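-- pv_equiv track=rewrite | github.com/robertbrewer84/Synthesis-of-Magic-Card-Tricks | code/mr_synthesis_stochastic.py | verifyOnAll
-- ===== SOURCE A (Python) =====
-- def verifyOnAll(trick, audience):
--     if trick:
--         for i in range(len(trick)):
--             cut = trick[i:] + trick[:i]
--             for j in range(1,len(cut)+1-audience):
--                 if cut[0:audience] == cut[j:j+audience]:
--                     return i
--     return None
-- ===== SOURCE B (Python) =====
-- def verifyOnAll(trick, audience):
--     # Single backward sweep over the doubled list with a last-occurrence dict:
--     # nxt[i] = nearest position q > i (in the doubled list) whose length-`audience`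
--     # cyclic window equals i's; rotation i works iff that distance is <= n - audience.
--     n = len(trick)
--     doubled = trick + trick
--     last = {}
--     nxt = [0] * n
--     for p in range(2 * n - 1, -1, -1):
--         w = tuple(doubled[p % n : p % n + audience])
--         if p < n:
--             nxt[p] = last[w]  # present: position p + n has the same window
--         last[w] = p
--     for i in range(n):
--         if nxt[i] - i <= n - audience:
--             return i
--     return None
-- ===== Notes on version B (the rewrite author's own statement) =====
-- stated objective: faster
-- what changed: B replaces A's nested rotation-by-shift window comparisons with one backward sweep over the doubled list that records, via a last-occurrence dict, the nearest next position with an equal length-audience window; a rotation i then succeeds iff that precomputed distance is at most n-audience, so the answer is a single linear scan; Pre_ restricts to non-negative audience (a prefix length), the function's natural domain.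
-- outside the precondition, e.g. on verifyOnAll([1, 0], -1): A returns None, B returns 0; on verifyOnAll([1, 2], -2): A returns 0, B returns 0
import Mathlib
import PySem

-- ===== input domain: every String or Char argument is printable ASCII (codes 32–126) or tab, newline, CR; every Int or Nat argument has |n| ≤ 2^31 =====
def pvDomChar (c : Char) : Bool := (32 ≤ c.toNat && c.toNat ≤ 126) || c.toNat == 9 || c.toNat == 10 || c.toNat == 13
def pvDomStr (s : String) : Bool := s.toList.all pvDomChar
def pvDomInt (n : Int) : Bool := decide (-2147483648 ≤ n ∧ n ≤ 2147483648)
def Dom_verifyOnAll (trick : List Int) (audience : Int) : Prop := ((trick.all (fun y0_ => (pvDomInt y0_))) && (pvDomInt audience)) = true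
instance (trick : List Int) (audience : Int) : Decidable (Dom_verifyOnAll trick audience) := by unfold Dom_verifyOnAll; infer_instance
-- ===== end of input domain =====

-- B replaces A's nested rotation-by-shift window comparisons with one backward sweep over the doubled
-- list (a last-occurrence dict giving each position the distance to the next equal window), then a
-- single linear scan; objective: faster.

-- ===== PORT A =====
def verifyOnAll (trick : List Int) (audience : Int) : Option Int :=
  if trick ≠ [] then
    (PySem.List.pyRange 0 (PySem.List.len trick) 1).find? (fun i =>
      let cut := PySem.List.slice trick (some i) none ++ PySem.List.slice trick none (some i)
      (PySem.List.pyRange 1 (PySem.List.len cut + 1 - audience) 1).any (fun j =>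
        PySem.List.slice cut (some 0) (some audience) == PySem.List.slice cut (some j) (some (j + audience))))
  else none

-- ===== PORT B =====
def verifyOnAll_alt (trick : List Int) (audience : Int) : Option Int :=
  let n : Int := PySem.List.len trick
  let doubled := trick ++ trick
  let st := (PySem.List.pyRange (2 * n - 1) (-1) (-1)).foldl
    (fun (st : PySem.Dict (List Int) Int × List Int) (p : Int) =>
      let w := PySem.List.slice doubled (some (PySem.Int.mod p n)) (some (PySem.Int.mod p n + audience))
      -- nxt[p] = last[w]: the key is provably present (position p + n was already inserted), so getD is exact here
      let nxt := if p < n then PySem.List.pySetD st.2 p (st.1.getD w 0) else st.2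
      (st.1.insert w p, nxt))
    (PySem.Dict.empty, List.replicate trick.length 0)
  let nxt := st.2
  (PySem.List.pyRange 0 n 1).find? (fun i => PySem.List.pyGetD nxt i 0 - i ≤ n - audience)

-- ===== PRECONDITION & SPEC =====
-- Pre_ restricts to a non-negative audience: the audience is a prefix length, so a negative value is
-- outside the function's natural domain, and B's window classification does not reproduce Python's
-- negative-slice clamping there.
def Pre_verifyOnAll (trick : List Int) (audience : Int) : Prop := 0 ≤ audience
instance (trick : List Int) (audience : Int) : Decidable (Pre_verifyOnAll trick audience) := by unfold Pre_verifyOnAll; infer_instance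
def pvWitness_verifyOnAll : List Int × Int := ([1, 1], 1)
def Spec_verifyOnAll (trick : List Int) (audience : Int) (out : Option Int) : Prop := out = verifyOnAll_alt trick audience
instance (trick : List Int) (audience : Int) (out : Option Int) : Decidable (Spec_verifyOnAll trick audience out) := by unfold Spec_verifyOnAll; infer_instance

-- ===== CLAIM (what is proved, stated in full; the proofs are below) =====
def Claim_equal_verifyOnAll : Prop := ∀ (trick : List Int) (audience : Int), Dom_verifyOnAll trick audience → Pre_verifyOnAll trick audience → Spec_verifyOnAll trick audience (verifyOnAll trick audience)

-- ===== LEMMAS AND PROOFS =====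

-- the length-`audience` window of the doubled list starting at q
def pvW (trick : List Int) (audience : Int) (q : Nat) : List Int :=
  ((trick ++ trick).drop q).take audience.toNat

-- the cyclic window class of a doubled-list position
def pvKey (trick : List Int) (audience : Int) (q : Nat) : List Int :=
  pvW trick audience (q % trick.length)

-- least position in [m, 2n) whose window class is w
def pvLeast? (trick : List Int) (audience : Int) (m : Nat) (w : List Int) : Option Nat :=
  (List.range' m (2 * trick.length - m)).find? (fun p => pvKey trick audience p == w)

-- nearest later doubled-list position with the same window class
def pvNext? (trick : List Int) (audience : Int) (p : Nat) : Option Nat :=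
  pvLeast? trick audience (p + 1) (pvKey trick audience p)

-- B's backward sweep, cut after k steps
def pvStepB (trick : List Int) (audience : Int)
    (st : PySem.Dict (List Int) Int × List Int) (p : Int) :
    PySem.Dict (List Int) Int × List Int :=
  let n : Int := PySem.List.len trick
  let doubled := trick ++ trick
  let w := PySem.List.slice doubled (some (PySem.Int.mod p n)) (some (PySem.Int.mod p n + audience))
  let nxt := if p < n then PySem.List.pySetD st.2 p (st.1.getD w 0) else st.2
  (st.1.insert w p, nxt)

def pvFoldB (trick : List Int) (audience : Int) (k : Nat) :
    PySem.Dict (List Int) Int × List Int :=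
  (List.range k).foldl
    (fun st (j : Nat) => pvStepB trick audience st (2 * (trick.length : Int) - 1 - (j : Int)))
    (PySem.Dict.empty, List.replicate trick.length 0)

-- generic list facts
theorem pv_find?_congr {α : Type} (l : List α) (p q : α → Bool) (h : ∀ a ∈ l, p a = q a) :
    l.find? p = l.find? q := by
  induction l with
  | nil => rfl
  | cons x xs ih =>
    simp only [List.find?_cons]; rw [h x (by simp)]
    split
    · rfl
    · exact ih (fun a ha => h a (by simp [ha]))

theorem pv_take_drop_take (l : List Int) (n x a : Nat) (h : x + a ≤ n) :
    ((l.take n).drop x).take a = (l.drop x).take a := by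
  simp [List.drop_take, List.take_take]; omega

-- the rotation list A builds is a window of the doubled list
theorem pv_cut_eq (t : List Int) (i : Nat) (hi : i ≤ t.length) :
    t.drop i ++ t.take i = ((t ++ t).drop i).take t.length := by
  rw [List.drop_append_of_le_length hi, List.take_append,
      List.take_of_length_le (l := t.drop i) (by simp),
      show t.length - (t.drop i).length = i by simp; omega]

theorem pv_cut_window (t : List Int) (i x a : Nat) (hi : i ≤ t.length) (hxa : x + a ≤ t.length) :
    (((t.drop i ++ t.take i).drop x).take a) = ((t ++ t).drop (i + x)).take a := by
  rw [pv_cut_eq t i hi, pv_take_drop_take _ _ _ _ hxa, List.drop_drop]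

-- windows at distance n agree (periodicity of the doubled list)
theorem pvW_sub (t : List Int) (a : Int) (q : Nat) (h1 : t.length ≤ q)
    (h2 : q + a.toNat ≤ 2 * t.length) : pvW t a q = pvW t a (q - t.length) := by
  unfold pvW
  rw [show (t ++ t).drop q = t.drop (q - t.length) by
        rw [List.drop_append, List.drop_of_length_le h1]; simp]
  rw [List.drop_append_of_le_length (by omega : q - t.length ≤ t.length)]
  rw [List.take_append_of_le_length (by simp; omega)]

-- key of a position below n is its window; key is n-periodic on [0, 2n)
theorem pvKey_lt (t : List Int) (a : Int) (p : Nat) (hp : p < t.length) :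
    pvKey t a p = pvW t a p := by
  unfold pvKey; rw [Nat.mod_eq_of_lt hp]

theorem pvKey_eq_pvW (t : List Int) (a : Int) (ha : 0 ≤ a) (q : Nat)
    (hq : q + a.toNat ≤ 2 * t.length) (hq2 : q < 2 * t.length) (ht : t ≠ []) :
    pvKey t a q = pvW t a q := by
  by_cases h : q < t.length
  · exact pvKey_lt t a q h
  · unfold pvKey
    rw [Nat.mod_eq_sub_mod (by omega), Nat.mod_eq_of_lt (by have := List.length_pos_of_ne_nil ht; omega)]
    exact (pvW_sub t a q (by omega) hq).symm

theorem pv_slice_key (t : List Int) (a : Int) (ha : 0 ≤ a) (x : Nat) :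
    PySem.List.slice (t ++ t) (some (x : Int)) (some ((x : Int) + a)) = pvW t a x := by
  rw [PySem.List.slice_toNat _ (by positivity) (by omega)]
  unfold pvW
  rw [show ((x : Int) + a).toNat - ((x : Int)).toNat = a.toNat by omega]
  simp

-- the fold invariant
theorem pvFoldB_inv (t : List Int) (a : Int) (ha : 0 ≤ a) (k : Nat) (hk : k ≤ 2 * t.length) :
    (∀ w, (pvFoldB t a k).1.get? w =
        (pvLeast? t a (2 * t.length - k) w).map (fun q => ((q : Nat) : Int))) ∧
    (pvFoldB t a k).2.length = t.length ∧
    (∀ p : Nat, p < t.length →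
      (pvFoldB t a k).2.getD p 0 =
        if 2 * t.length - k ≤ p then (((pvNext? t a p).getD 0 : Nat) : Int) else 0) := by
  induction k with
  | zero =>
    refine ⟨?_, ?_, ?_⟩
    · intro w
      simp [pvFoldB, pvLeast?, PySem.Dict.get?_empty, Nat.sub_self]
    · simp [pvFoldB]
    · intro p hp
      simp only [pvFoldB, List.range_zero, List.foldl_nil]
      rw [if_neg (by omega)]
      simp [List.getD_eq_getElem?_getD, List.getElem?_replicate, hp]
  | succ k ih =>
    obtain ⟨ihD, ihL, ihN⟩ := ih (by omega)
    set pN : Nat := 2 * t.length - 1 - k with hpN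
    have hstep : pvFoldB t a (k + 1) =
        pvStepB t a (pvFoldB t a k) (2 * (t.length : Int) - 1 - (k : Int)) := by
      simp [pvFoldB, List.range_succ]
    have hpI : (2 * (t.length : Int) - 1 - (k : Int)) = ((pN : Nat) : Int) := by omega
    have hm1 : 2 * t.length - (k + 1) = pN := by omega
    have hm2 : 2 * t.length - k = pN + 1 := by omega
    rw [hstep, hpI]
    unfold pvStepB
    simp only [PySem.List.len_eq]
    rw [PySem.Int.mod_natCast, pv_slice_key t a ha (pN % t.length),
        show pvW t a (pN % t.length) = pvKey t a pN from rfl]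
    have hdict : ∀ w', ((pvFoldB t a k).1.insert (pvKey t a pN) ((pN : Nat) : Int)).get? w' =
        (pvLeast? t a pN w').map (fun q => ((q : Nat) : Int)) := by
      intro w'
      rw [PySem.Dict.get?_insert]
      unfold pvLeast?
      rw [show 2 * t.length - pN = k + 1 by omega, List.range'_succ, List.find?_cons]
      by_cases hww : w' = pvKey t a pN
      · rw [if_pos hww, hww]
        simp
      · have hbe : (pvKey t a pN == w') = false := by
          simp only [beq_eq_false_iff_ne, ne_eq]
          exact fun h => hww h.symm
        rw [if_neg hww, hbe]
        show (pvFoldB t a k).1.get? w' =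
          Option.map (fun q => ((q : Nat) : Int))
            (List.find? (fun p => pvKey t a p == w') (List.range' (pN + 1) k))
        rw [ihD w', hm2]
        unfold pvLeast?
        rw [show 2 * t.length - (pN + 1) = k by omega]
    have hv : (pvFoldB t a k).1.getD (pvKey t a pN) 0 =
        (((pvNext? t a pN).getD 0 : Nat) : Int) := by
      rw [PySem.Dict.getD_eq_get?_getD, ihD, hm2]
      show ((pvLeast? t a (pN + 1) (pvKey t a pN)).map _).getD 0 = _
      unfold pvNext?
      cases pvLeast? t a (pN + 1) (pvKey t a pN) <;> simp
    by_cases hcase : pN < t.length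
    · rw [if_pos (by exact_mod_cast hcase)]
      refine ⟨fun w' => by rw [hm1]; exact hdict w', ?_, ?_⟩
      · simp [PySem.List.pySetD_natCast, ihL]
      · intro p' hp'
        simp only [PySem.List.pySetD_natCast]
        rw [hm1]
        by_cases hpp : p' = pN
        · subst hpp
          rw [List.getD_eq_getElem?_getD, List.getElem?_set, if_pos rfl,
              if_pos (le_refl _)]
          rw [ihL]
          simp [hcase, hv]
        · rw [List.getD_eq_getElem?_getD, List.getElem?_set, if_neg (by omega),
              ← List.getD_eq_getElem?_getD, ihN p' hp', hm2]
          split_ifs with h1 h2 h3 <;> first | rfl | omega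
    · rw [if_neg (by exact_mod_cast hcase)]
      refine ⟨fun w' => by rw [hm1]; exact hdict w', ihL, ?_⟩
      intro p' hp'
      rw [ihN p' hp', hm1, hm2, if_neg (by omega), if_neg (by omega)]

-- existence and bounds of pvNext?
theorem pvNext?_spec (t : List Int) (a : Int) (p : Nat) (hp : p < t.length) :
    ∃ q, pvNext? t a p = some q ∧ p < q ∧ q ≤ p + t.length ∧
      pvKey t a q = pvKey t a p ∧ ∀ r, p < r → r < q → pvKey t a r ≠ pvKey t a p := by
  have hn : 1 ≤ t.length := by omega
  have hkey : pvKey t a (p + t.length) = pvKey t a p := by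
    unfold pvKey; rw [Nat.add_mod_right]
  have hmem : p + t.length ∈ List.range' (p + 1) (2 * t.length - (p + 1)) := by
    rw [List.mem_range'_1]; omega
  have hsome : ((List.range' (p + 1) (2 * t.length - (p + 1))).find?
      (fun r => pvKey t a r == pvKey t a p)).isSome := by
    rw [List.find?_isSome]
    exact ⟨_, hmem, by simp [hkey]⟩
  obtain ⟨q, hq⟩ := Option.isSome_iff_exists.mp hsome
  have hq' := hq
  rw [List.find?_range'_eq_some] at hq'
  obtain ⟨hpq, hqmem, hmin⟩ := hq'
  rw [List.mem_range'_1] at hqmem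
  have hle : q ≤ p + t.length := by
    by_contra hgt
    have := hmin (p + t.length) (by omega) (by omega)
    simp [hkey] at this
  exact ⟨q, hq, by omega, hle, by simpa using hpq,
    fun r hr1 hr2 => by simpa using hmin r (by omega) hr2⟩

-- the inner searches of A and B agree pointwise
theorem pv_pred_eq (t : List Int) (a : Int) (ha : 0 ≤ a) (k : Nat) (hk : k < t.length) :
    ((PySem.List.pyRange 1 ((t.length : Int) + 1 - a) 1).any (fun j =>
        PySem.List.slice (t.drop k ++ t.take k) (some 0) (some a) ==
        PySem.List.slice (t.drop k ++ t.take k) (some j) (some (j + a)))) =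
    decide ((((pvNext? t a k).getD 0 : Nat) : Int) - (k : Int) ≤ (t.length : Int) - a) := by
  have ht : t ≠ [] := by intro h; rw [h] at hk; simp at hk
  obtain ⟨q, hq, hq1, hq2, hq3, hq4⟩ := pvNext?_spec t a k hk
  rw [hq]
  simp only [Option.getD_some]
  rw [Bool.eq_iff_iff]
  simp only [List.any_eq_true, decide_eq_true_eq]
  have hcut0 : a.toNat ≤ t.length → (t.drop k ++ t.take k).take a.toNat = pvW t a k := by
    intro hle
    have := pv_cut_window t k 0 a.toNat (by omega) (by omega)
    simpa [pvW] using this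
  constructor
  · rintro ⟨j, hj, heq⟩
    rw [PySem.List.mem_pyRange_one] at hj
    obtain ⟨hj1, hj2⟩ := hj
    have hjN : j = ((j.toNat : Nat) : Int) := by omega
    have hja : j.toNat + a.toNat ≤ t.length := by omega
    rw [beq_iff_eq] at heq
    rw [PySem.List.slice_zero_start, PySem.List.slice_to _ ha] at heq
    rw [hjN, PySem.List.slice_toNat _ (by omega) (by omega)] at heq
    rw [show (((j.toNat : Nat) : Int) + a).toNat - (((j.toNat : Nat) : Int)).toNat = a.toNat by omega] at heq
    simp only [Int.toNat_natCast] at heq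
    have h2 : ((t.drop k ++ t.take k).drop j.toNat).take a.toNat = pvW t a (k + j.toNat) := by
      have := pv_cut_window t k j.toNat a.toNat (by omega) hja
      simpa [pvW] using this
    rw [hcut0 (by omega), h2] at heq
    have hkey : pvKey t a (k + j.toNat) = pvKey t a k := by
      rw [pvKey_lt t a k hk, pvKey_eq_pvW t a ha _ (by omega) (by omega) ht, ← heq]
    have hqle : q ≤ k + j.toNat := by
      by_contra hgt
      exact hq4 (k + j.toNat) (by omega) (by omega) hkey
    omega
  · intro h
    refine ⟨((q - k : Nat) : Int), ?_, ?_⟩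
    · rw [PySem.List.mem_pyRange_one]
      constructor <;> omega
    · have hja : (q - k) + a.toNat ≤ t.length := by omega
      rw [beq_iff_eq]
      rw [PySem.List.slice_zero_start, PySem.List.slice_to _ ha]
      rw [PySem.List.slice_toNat _ (by omega) (by omega)]
      rw [show (((q - k : Nat) : Int) + a).toNat - (((q - k : Nat) : Int)).toNat = a.toNat by omega]
      have h2 : ((t.drop k ++ t.take k).drop (((q - k : Nat) : Int)).toNat).take a.toNat = pvW t a q := by
        rw [Int.toNat_natCast]
        have := pv_cut_window t k (q - k) a.toNat (by omega) hja
        rw [show k + (q - k) = q by omega] at this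
        simpa [pvW] using this
      rw [hcut0 (by omega), h2]
      rw [← pvKey_lt t a k hk, ← hq3, pvKey_eq_pvW t a ha q (by omega) (by omega) ht]

-- the port's fold is pvFoldB at 2n
theorem pv_fold_eq (t : List Int) (a : Int) :
    (PySem.List.pyRange (2 * (PySem.List.len t) - 1) (-1) (-1)).foldl
      (fun (st : PySem.Dict (List Int) Int × List Int) (p : Int) =>
        let w := PySem.List.slice (t ++ t) (some (PySem.Int.mod p (PySem.List.len t)))
                   (some (PySem.Int.mod p (PySem.List.len t) + a))
        let nxt := if p < PySem.List.len t then PySem.List.pySetD st.2 p (st.1.getD w 0) else st.2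
        (st.1.insert w p, nxt))
      (PySem.Dict.empty, List.replicate t.length 0) = pvFoldB t a (2 * t.length) := by
  unfold pvFoldB pvStepB
  simp only [PySem.List.len_eq]
  rw [PySem.List.pyRange_neg_one]
  rw [show ((2 * (t.length : Int) - 1) - (-1)).toNat = 2 * t.length by omega]
  simp only [List.foldl_map]

-- ===== VERDICT (by name: the statement is the Claim_ definition above) =====
theorem verifyOnAll_spec : Claim_equal_verifyOnAll := by
  intro t a hdom hpre
  have ha : 0 ≤ a := hpre
  unfold Spec_verifyOnAll
  by_cases ht : t = []
  · subst ht; rfl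
  · have hB : verifyOnAll_alt t a =
        (PySem.List.pyRange 0 (PySem.List.len t) 1).find? (fun i =>
          PySem.List.pyGetD (pvFoldB t a (2 * t.length)).2 i 0 - i ≤ PySem.List.len t - a) := by
      simp only [verifyOnAll_alt]
      rw [pv_fold_eq t a]
    unfold verifyOnAll
    rw [if_pos ht, hB]
    apply pv_find?_congr
    intro i hi
    rw [PySem.List.mem_pyRange_one] at hi
    obtain ⟨hi0, hi1⟩ := hi
    rw [show i = ((i.toNat : Nat) : Int) by omega]
    set k := i.toNat with hkdef
    have hk : k < t.length := by simp only [PySem.List.len_eq] at hi1; omega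
    -- A side: name the rotation and normalise its slices and length
    rw [PySem.List.slice_from _ (by positivity), PySem.List.slice_to _ (by positivity)]
    simp only [Int.toNat_natCast, PySem.List.len_eq]
    rw [show ((t.drop k ++ t.take k).length : Int) = (t.length : Int) by simp; omega]
    -- B side: the precomputed next-occurrence distance
    rw [PySem.List.pyGetD_natCast]
    obtain ⟨-, -, hval⟩ := pvFoldB_inv t a ha (2 * t.length) (le_refl _)
    rw [hval k hk, if_pos (by omega)]
    exact pv_pred_eq t a ha k hk
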